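-- pv_equiv track=rewrite | github.com/Bogdan740/AdventOfCode | 2020/Day10Part2/Day10Part2.py | checkgaps
-- ===== SOURCE A (Python) =====
-- def checkgaps(arr):
--     valid = True
--     for i,val in enumerate(arr):
--         try:
--             if (arr[i+1] - val) > 3:
--                 valid = False
--         except IndexError:
--             pass
--     return valid
-- ===== SOURCE B (Python) =====
-- def checkgaps(arr):
--     # Divide and conquer: split at the midpoint with an overlapping boundary
--     # element, so every adjacent pair lands in exactly one half's range.
--     if len(arr) < 2:
--         return True
--     if len(arr) == 2:
--         return arr[1] - arr[0] <= 3
--     mid = len(arr) // 2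
--     return checkgaps(arr[:mid + 1]) and checkgaps(arr[mid:])
-- ===== Notes on version B (the rewrite author's own statement) =====
-- stated objective: alternative
-- what changed: Replaces A's left-to-right scan with a mutable validity flag (and try/except indexing) by a divide-and-conquer recursion: split the list at the midpoint with an overlapping boundary element and conjoin the results of the two halves.
import Mathlib
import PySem

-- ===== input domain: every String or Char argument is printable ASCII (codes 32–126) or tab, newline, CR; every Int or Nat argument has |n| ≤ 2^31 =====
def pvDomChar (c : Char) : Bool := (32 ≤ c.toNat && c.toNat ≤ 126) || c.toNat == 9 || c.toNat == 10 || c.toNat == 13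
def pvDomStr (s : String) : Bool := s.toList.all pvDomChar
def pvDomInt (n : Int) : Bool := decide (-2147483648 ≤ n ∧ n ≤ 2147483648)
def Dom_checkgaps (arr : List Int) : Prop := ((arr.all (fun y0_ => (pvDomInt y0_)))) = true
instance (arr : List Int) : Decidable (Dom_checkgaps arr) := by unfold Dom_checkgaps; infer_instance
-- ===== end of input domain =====

-- B replaces A's left-to-right scan with a mutable validity flag by a
-- divide-and-conquer recursion on overlapping halves (alternative decomposition).

-- ===== PORT A =====
-- for i,val in enumerate(arr): try: if arr[i+1]-val > 3: valid = False; except IndexError: pass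
def checkgaps (arr : List Int) : Bool :=
  (PySem.List.enumerate arr 0).foldl (fun valid iv =>
    match PySem.List.pyGet? arr (iv.1 + 1) with
    | some nxt => if nxt - iv.2 > 3 then false else valid
    | none => valid) true

-- ===== PORT B =====
-- if len(arr) < 2: return True
-- if len(arr) == 2: return arr[1] - arr[0] <= 3        (indices 0,1 are in range: getD is exact)
-- mid = len(arr) // 2; return checkgaps(arr[:mid+1]) and checkgaps(arr[mid:])
-- (structural recursion on a fuel counter = len(arr), a totality guard only:
--  each recursive call is on a strictly shorter list, so fuel never runs out)
def checkgapsAltGo : Nat → List Int → Bool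
  | 0, _ => true
  | fuel + 1, arr =>
    if arr.length < 2 then true
    else if arr.length = 2 then decide (arr.getD 1 0 - arr.getD 0 0 ≤ 3)
    else
      let mid : Nat := arr.length / 2
      checkgapsAltGo fuel (PySem.List.slice arr none (some ((mid : Int) + 1))) &&
        checkgapsAltGo fuel (PySem.List.slice arr (some (mid : Int)) none)

def checkgaps_alt (arr : List Int) : Bool := checkgapsAltGo arr.length arr

-- ===== PRECONDITION & SPEC =====
def Spec_checkgaps (arr : List Int) (out : Bool) : Prop := out = checkgaps_alt arr
instance (arr : List Int) (out : Bool) : Decidable (Spec_checkgaps arr out) := by unfold Spec_checkgaps; infer_instance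

-- ===== CLAIM (what is proved, stated in full; the proofs are below) =====
def Claim_equal_checkgaps : Prop := ∀ (arr : List Int), Dom_checkgaps arr → Spec_checkgaps arr (checkgaps arr)

-- ===== LEMMAS AND PROOFS =====

-- the index-wise "all gaps ≤ 3" characterisation both ports are measured against
def GapsOK (arr : List Int) : Prop :=
  ∀ (k : Nat) (h : k + 1 < arr.length), arr[k + 1] - arr[k] ≤ 3

-- A's loop body never turns the flag back on: the fold equals the start flag && "no violation seen".
theorem foldl_flag {α : Type} (p : α → Bool) :
    ∀ (l : List α) (b : Bool),
      l.foldl (fun v x => if p x then false else v) b = (b && l.all (fun x => !p x)) := by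
  intro l
  induction l with
  | nil => simp
  | cons x t ih =>
      intro b
      by_cases h : p x = true
      · rw [List.foldl_cons, if_pos h, ih]; simp [h]
      · rw [List.foldl_cons, if_neg h, ih]; simp [h]

-- the violation predicate A tests at index i
def gapBad (arr : List Int) (iv : Int × Int) : Bool :=
  match PySem.List.pyGet? arr (iv.1 + 1) with
  | some nxt => decide (nxt - iv.2 > 3)
  | none => false

theorem checkgaps_eq_all (arr : List Int) :
    checkgaps arr = (PySem.List.enumerate arr 0).all (fun iv => ! gapBad arr iv) := by
  unfold checkgaps
  have : (fun (valid : Bool) (iv : Int × Int) =>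
      match PySem.List.pyGet? arr (iv.1 + 1) with
      | some nxt => if nxt - iv.2 > 3 then false else valid
      | none => valid)
      = (fun v iv => if gapBad arr iv then false else v) := by
    funext v iv
    unfold gapBad
    cases PySem.List.pyGet? arr (iv.1 + 1) with
    | none => simp
    | some nxt => by_cases h : nxt - iv.2 > 3 <;> simp [h]
  rw [this, foldl_flag]
  simp

-- A returns true exactly when every adjacent gap is ≤ 3
theorem checkgaps_iff (arr : List Int) : checkgaps arr = true ↔ GapsOK arr := by
  rw [checkgaps_eq_all]
  simp only [List.all_eq_true, Bool.not_eq_eq_eq_not, Bool.not_true]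
  constructor
  · intro H k hk
    have hmem : ((0:Int) + (k:Int), arr[k]) ∈ PySem.List.enumerate arr :=
      (PySem.List.mem_enumerate_iff _ _ _).mpr ⟨k, by omega, rfl⟩
    have hA := H _ hmem
    unfold gapBad at hA
    rw [show ((0:Int) + (k:Int) + 1) = ((k+1 : Nat) : Int) by push_cast; ring,
      PySem.List.pyGet?_natCast, List.getElem?_eq_getElem hk] at hA
    simp only [decide_eq_false_iff_not, not_lt] at hA
    exact hA
  · intro H iv hiv
    rw [PySem.List.mem_enumerate_iff] at hiv
    obtain ⟨k, hk, rfl⟩ := hiv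
    unfold gapBad
    rw [show ((0:Int) + (k:Int) + 1) = ((k+1 : Nat) : Int) by push_cast; ring,
      PySem.List.pyGet?_natCast]
    by_cases h : k + 1 < arr.length
    · rw [List.getElem?_eq_getElem h]
      simp only [decide_eq_false_iff_not, not_lt]
      exact H k h
    · rw [List.getElem?_eq_none (by omega)]

-- B's divide-and-conquer returns true exactly when every adjacent gap is ≤ 3:
-- the overlapping split covers each adjacent pair in exactly one half.
theorem checkgapsAltGo_iff : ∀ (fuel : Nat) (arr : List Int), arr.length ≤ fuel →
    (checkgapsAltGo fuel arr = true ↔ GapsOK arr) := by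
  intro fuel
  induction fuel with
  | zero =>
      intro arr h
      have : arr = [] := List.eq_nil_of_length_eq_zero (by omega)
      subst this
      simp only [checkgapsAltGo, true_iff, GapsOK]
      intro k hk
      simp at hk
  | succ f ih =>
      intro arr hf
      simp only [checkgapsAltGo]
      by_cases h2 : arr.length < 2
      · simp only [if_pos h2, true_iff]
        intro k hk; omega
      · rw [if_neg h2]
        by_cases he : arr.length = 2
        · rw [if_pos he]
          obtain ⟨a, b, hab⟩ : ∃ a b, arr = [a, b] := by
            match arr, he with
            | [a, b], _ => exact ⟨a, b, rfl⟩
          subst hab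
          simp only [decide_eq_true_eq, GapsOK]
          constructor
          · intro h k hk
            have hk0 : k = 0 := by simp only [List.length_cons, List.length_nil] at hk; omega
            subst hk0; simpa using h
          · intro h; simpa using h 0 (by simp)
        · rw [if_neg he]
          have hlen : 3 ≤ arr.length := by omega
          set m : Nat := arr.length / 2 with hm
          have h1 : PySem.List.slice arr none (some ((m : Int) + 1)) = arr.take (m + 1) := by
            rw [show ((m : Int) + 1) = (((m + 1 : Nat)) : Int) by push_cast; ring]
            exact PySem.List.slice_to_natCast arr _
          have h2' : PySem.List.slice arr (some (m : Int)) none = arr.drop m :=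
            PySem.List.slice_from_natCast arr _
          show (checkgapsAltGo f (PySem.List.slice arr none (some ((m : Int) + 1))) &&
              checkgapsAltGo f (PySem.List.slice arr (some (m : Int)) none)) = true ↔ GapsOK arr
          rw [h1, h2', Bool.and_eq_true,
            ih _ (by simp [List.length_take]; omega),
            ih _ (by simp [List.length_drop]; omega)]
          unfold GapsOK
          constructor
          · rintro ⟨hl, hr⟩ k hk
            by_cases hkm : k + 1 < m + 1
            · have := hl k (by simp [List.length_take]; omega)
              simpa [List.getElem_take] using this
            · obtain ⟨j, rfl⟩ : ∃ j, k = m + j := ⟨k - m, by omega⟩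
              have h' := hr j (by simp [List.length_drop]; omega)
              simpa [List.getElem_drop, Nat.add_assoc] using h'
          · intro H
            refine ⟨fun k hk => ?_, fun k hk => ?_⟩
            · simp only [List.length_take] at hk
              have := H k (by omega)
              simpa [List.getElem_take] using this
            · simp only [List.length_drop] at hk
              have := H (m + k) (by omega)
              simpa [List.getElem_drop, Nat.add_assoc] using this

theorem checkgaps_alt_iff (arr : List Int) : checkgaps_alt arr = true ↔ GapsOK arr :=
  checkgapsAltGo_iff arr.length arr le_rfl

-- ===== VERDICT (by name: the statement is the Claim_ definition above) =====
theorem checkgaps_spec : Claim_equal_checkgaps := by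
  intro arr _
  unfold Spec_checkgaps
  rw [Bool.eq_iff_iff, checkgaps_iff, checkgaps_alt_iff]
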